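-- pv_equiv track=rewrite | github.com/ljm0850/algo-problem | baekjoon/1756.py | solution
-- ===== SOURCE A (Python) =====
-- def minCheck(arr:list[int])->tuple[list,dict]:
--     ls = list()
--     cnt = dict()
--     minValue = 1000000001
--     for num in arr:
--         if num < minValue:
--             minValue = num
--             ls.append(minValue)
--             cnt[minValue] = 1
--         else:
--             cnt[minValue] += 1
--     return ls,cnt
--
-- def solution(D,N,oven,pizza):
--     minList,cnt = minCheck(oven)
--     for length in pizza:
--         while minList:
--             if length > minList[-1]:
--                 minList.pop()
--             else:
--                 break
--         if minList:
--             ovenSize = minList[-1]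
--             cnt[ovenSize] -= 1
--             if cnt[ovenSize] == 0:
--                 minList.pop()
--         else:
--             return 0
--     value = 1
--     for ovenSize in minList:
--         value += cnt[ovenSize]
--     return value
-- ===== SOURCE B (Python) =====
-- def solution(D, N, oven, pizza):
--     # Expanded prefix-minimum array + one integer pointer instead of A's
--     # distinct-value stack and counts dict.
--     pm = []
--     for x in oven:
--         pm.append(x if not pm or x < pm[-1] else pm[-1])
--     ptr = len(pm) - 1
--     for L in pizza:
--         while ptr >= 0 and L > pm[ptr]:
--             ptr -= 1
--         if ptr < 0:
--             return 0
--         ptr -= 1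
--     return ptr + 2
-- ===== Notes on version B (the rewrite author's own statement) =====
-- stated objective: simpler
-- what changed: Replaces A's distinct-prefix-minimum stack plus run-length counts dict (and the minCheck helper) with an explicit expanded prefix-minimum array and a single integer pointer consumed one slot at a time.
-- outside the precondition, e.g. on solution(0, 1, [1000000001], []): A raises KeyError, B returns 2
import Mathlib
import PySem

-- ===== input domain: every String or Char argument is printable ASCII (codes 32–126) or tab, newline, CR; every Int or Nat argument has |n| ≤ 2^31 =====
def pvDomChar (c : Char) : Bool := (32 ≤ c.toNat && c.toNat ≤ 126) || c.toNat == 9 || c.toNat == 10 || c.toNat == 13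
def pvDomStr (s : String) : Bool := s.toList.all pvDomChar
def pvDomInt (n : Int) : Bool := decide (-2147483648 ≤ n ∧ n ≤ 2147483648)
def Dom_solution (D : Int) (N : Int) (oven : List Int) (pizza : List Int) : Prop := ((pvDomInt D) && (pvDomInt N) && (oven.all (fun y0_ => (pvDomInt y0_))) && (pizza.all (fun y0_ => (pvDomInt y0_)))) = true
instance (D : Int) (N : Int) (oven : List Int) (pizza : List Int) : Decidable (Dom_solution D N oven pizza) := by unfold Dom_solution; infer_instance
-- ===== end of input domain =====

-- B replaces A's distinct-minimum stack + counts dict with an expanded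
-- prefix-minimum array and one pointer (simpler; return value only, no mutation).


-- ===== PORT A =====
-- minCheck's for-loop: state (ls, cnt, minValue)
def minCheckGo : List Int → List Int → PySem.Dict Int Int → Int → (List Int × PySem.Dict Int Int)
  | [], ls, cnt, _ => (ls, cnt)
  | num :: rest, ls, cnt, minValue =>
    if num < minValue then
      minCheckGo rest (ls ++ [num]) (cnt.insert num 1) num
    else
      -- cnt[minValue] += 1 (KeyError when minValue is absent is excluded by Pre_)
      minCheckGo rest ls (cnt.insert minValue (cnt.getD minValue 0 + 1)) minValue

def minCheck (arr : List Int) : (List Int × PySem.Dict Int Int) :=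
  minCheckGo arr [] PySem.Dict.empty 1000000001

-- the inner while: pop from the end while length > minList[-1]
def whilePopA (L : Int) (ls : List Int) : List Int :=
  match h : ls.getLast? with
  | none => ls
  | some x => if L > x then whilePopA L ls.dropLast else ls
termination_by ls.length
decreasing_by
  have : ls ≠ [] := by intro hh; subst hh; simp at h
  simp [List.length_dropLast]
  exact List.length_pos_iff.mpr this

-- the for-loop over pizza
def loopA (ml : List Int) (cnt : PySem.Dict Int Int) : List Int → Int
  | [] => ml.foldl (fun acc s => acc + cnt.getD s 0) 1
  | L :: rest =>
    let ml1 := whilePopA L ml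
    match ml1.getLast? with
    | some s =>
      let cnt1 := cnt.insert s (cnt.getD s 0 - 1)
      if cnt1.getD s 0 == 0 then loopA ml1.dropLast cnt1 rest else loopA ml1 cnt1 rest
    | none => 0

def solution (D : Int) (N : Int) (oven : List Int) (pizza : List Int) : Int :=
  let mc := minCheck oven
  loopA mc.1 mc.2 pizza

-- ===== PORT B =====
-- pm.append(x if not pm or x < pm[-1] else pm[-1])
def prefixMinGo (pm : List Int) : List Int → List Int
  | [] => pm
  | x :: rest =>
    prefixMinGo (pm ++ [match pm.getLast? with
                        | none => x
                        | some m => if x < m then x else m]) rest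

-- while ptr >= 0 and L > pm[ptr]: ptr -= 1
def whileB (pm : List Int) (L : Int) (ptr : Int) : Int :=
  if h : 0 ≤ ptr ∧ L > (PySem.List.pyGet? pm ptr).getD 0 then whileB pm L (ptr - 1) else ptr
termination_by (ptr + 1).toNat
decreasing_by omega

def loopB (pm : List Int) : Int → List Int → Int
  | ptr, [] => ptr + 2
  | ptr, L :: rest =>
    let p := whileB pm L ptr
    if p < 0 then 0 else loopB pm (p - 1) rest

def solution_alt (D : Int) (N : Int) (oven : List Int) (pizza : List Int) : Int :=
  let pm := prefixMinGo [] oven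
  loopB pm ((pm.length : Int) - 1) pizza

-- ===== PRECONDITION & SPEC =====
-- Pre_ excludes exactly the inputs where A raises KeyError: a nonempty oven whose
-- first element is ≥ A's sentinel 1000000001 (headI of [] is 0, so [] is admitted).
def Pre_solution (D : Int) (N : Int) (oven : List Int) (pizza : List Int) : Prop :=
  oven.headI < 1000000001
instance (D : Int) (N : Int) (oven : List Int) (pizza : List Int) : Decidable (Pre_solution D N oven pizza) := by unfold Pre_solution; infer_instance

def pvWitness_solution : Int × Int × List Int × List Int := (0, 2, [5, 3, 7, 3], [3, 4])

def Spec_solution (D : Int) (N : Int) (oven : List Int) (pizza : List Int) (out : Int) : Prop := out = solution_alt D N oven pizza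
instance (D : Int) (N : Int) (oven : List Int) (pizza : List Int) (out : Int) : Decidable (Spec_solution D N oven pizza out) := by unfold Spec_solution; infer_instance

-- ===== CLAIM (what is proved, stated in full; the proofs are below) =====
def Claim_equal_solution : Prop := ∀ (D : Int) (N : Int) (oven : List Int) (pizza : List Int), Dom_solution D N oven pizza → Pre_solution D N oven pizza → Spec_solution D N oven pizza (solution D N oven pizza)

-- ===== LEMMAS AND PROOFS =====

-- proof-only helpers: the multiset of usable slots as an explicit list
def rtrim (L : Int) (t : List Int) : List Int :=
  (t.reverse.dropWhile (fun x => decide (x < L))).reverse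

def ref : List Int → List Int → Int
  | t, [] => (t.length : Int) + 1
  | t, L :: rest => if rtrim L t = [] then 0 else ref (rtrim L t).dropLast rest

def expand (cnt : PySem.Dict Int Int) (ml : List Int) : List Int :=
  ml.flatMap (fun s => List.replicate (cnt.getD s 0).toNat s)

theorem rtrim_concat_lt {L x : Int} (t : List Int) (h : x < L) :
    rtrim L (t ++ [x]) = rtrim L t := by
  simp [rtrim, h]

theorem rtrim_concat_ge {L x : Int} (t : List Int) (h : ¬ x < L) :
    rtrim L (t ++ [x]) = t ++ [x] := by
  simp [rtrim, h]

theorem rtrim_concat_replicate_lt {L s : Int} (t : List Int) (n : Nat) (h : s < L) :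
    rtrim L (t ++ List.replicate n s) = rtrim L t := by
  induction n with
  | zero => simp
  | succ n ih =>
    rw [List.replicate_succ', ← List.append_assoc, rtrim_concat_lt _ h, ih]

theorem rtrim_prefix (L : Int) (t : List Int) : rtrim L t <+: t := by
  have := List.reverse_prefix.mpr (List.dropWhile_suffix (l := t.reverse) (fun x => decide (x < L)))
  simpa [rtrim] using this

theorem expand_concat (cnt : PySem.Dict Int Int) (u : List Int) (s : Int) :
    expand cnt (u ++ [s]) = expand cnt u ++ List.replicate (cnt.getD s 0).toNat s := by
  simp [expand]

theorem expand_insert_of_not_mem {k : Int} (v : Int) (cnt : PySem.Dict Int Int)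
    {ml : List Int} (h : k ∉ ml) :
    expand (cnt.insert k v) ml = expand cnt ml := by
  induction ml with
  | nil => rfl
  | cons s rest ih =>
    have hs : s ≠ k := fun he => h (by simp [he])
    simp only [expand, List.flatMap_cons] at *
    rw [ih (fun hm => h (List.mem_cons_of_mem _ hm)), PySem.Dict.getD_insert]
    simp [hs]

theorem sum_counts (cnt : PySem.Dict Int Int) :
    ∀ (ml : List Int) (c : Int), (∀ s ∈ ml, 1 ≤ cnt.getD s 0) →
    ml.foldl (fun a s => a + cnt.getD s 0) c = c + ((expand cnt ml).length : Int) := by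
  intro ml
  induction ml with
  | nil => intro c _; simp [expand]
  | cons s rest ih =>
    intro c h
    have h1 : 1 ≤ cnt.getD s 0 := h s (by simp)
    have := ih (c + cnt.getD s 0) (fun x hx => h x (by simp [hx]))
    simp only [List.foldl_cons, this, expand, List.flatMap_cons, List.length_append,
      List.length_replicate]
    push_cast
    omega

theorem getLast_min {ls : List Int} {mv : Int} (hl : ls.getLast? = some mv)
    (hp : List.Pairwise (· > ·) ls) : ∀ a ∈ ls, mv ≤ a := by
  obtain ⟨u, rfl⟩ := List.getLast?_eq_some_iff.mp hl
  intro a ha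
  rcases List.mem_append.mp ha with h | h
  · exact le_of_lt ((List.pairwise_append.mp hp).2.2 a h mv (by simp))
  · simp at h; omega

theorem expand_getLast {cnt : PySem.Dict Int Int} {ls : List Int} {mv : Int}
    (hl : ls.getLast? = some mv) (hc : 1 ≤ cnt.getD mv 0) :
    (expand cnt ls).getLast? = some mv := by
  obtain ⟨u, rfl⟩ := List.getLast?_eq_some_iff.mp hl
  rw [expand_concat]
  have : (cnt.getD mv 0).toNat = ((cnt.getD mv 0).toNat - 1) + 1 := by omega
  rw [this, List.replicate_succ', ← List.append_assoc, List.getLast?_concat]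

-- the inner while-loops of A and B both compute rtrim
theorem whilePopA_nil (L : Int) : whilePopA L [] = [] := by
  rw [whilePopA]
  simp

theorem whilePopA_concat (L : Int) (u : List Int) (s : Int) :
    whilePopA L (u ++ [s]) = if L > s then whilePopA L u else u ++ [s] := by
  rw [whilePopA]
  split
  · next heq => simp at heq
  · next x heq =>
      rw [List.getLast?_concat] at heq
      injection heq with heq
      subst heq
      rw [List.dropLast_concat]

theorem whilePopA_expand (L : Int) (ml : List Int) :
    ∀ (cnt : PySem.Dict Int Int), (∀ s ∈ ml, 1 ≤ cnt.getD s 0) →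
    expand cnt (whilePopA L ml) = rtrim L (expand cnt ml) ∧ whilePopA L ml <+: ml := by
  induction ml using List.reverseRecOn with
  | nil => intro cnt _; simp [whilePopA_nil, expand, rtrim]
  | append_singleton u s ih =>
    intro cnt hc
    have hcs : 1 ≤ cnt.getD s 0 := hc s (by simp)
    rw [whilePopA_concat]
    by_cases hls : s < L
    · rw [if_pos hls]
      obtain ⟨he, hp⟩ := ih cnt (fun x hx => hc x (by simp [hx]))
      refine ⟨?_, hp.trans (by simp)⟩
      rw [he, expand_concat, rtrim_concat_replicate_lt _ _ hls]
    · rw [if_neg hls]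
      refine ⟨?_, List.prefix_refl _⟩
      rw [expand_concat]
      have h1 : (cnt.getD s 0).toNat = ((cnt.getD s 0).toNat - 1) + 1 := by omega
      rw [h1, List.replicate_succ', ← List.append_assoc, rtrim_concat_ge _ hls]

theorem whileB_go (pm : List Int) (L : Int) :
    ∀ n : Nat, n ≤ pm.length →
    whileB pm L ((n : Int) - 1) = ((rtrim L (pm.take n)).length : Int) - 1 := by
  intro n
  induction n with
  | zero =>
    intro _
    rw [whileB]
    simp [rtrim]
  | succ n ih =>
    intro hn
    simp only [Nat.cast_add, Nat.cast_one]
    have hlt : n < pm.length := by omega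
    have hget : PySem.List.pyGet? pm ((n : Int) + 1 - 1) = some pm[n] := by
      have : ((n : Int) + 1 - 1) = ((n : Nat) : Int) := by omega
      rw [this, PySem.List.pyGet?_natCast, List.getElem?_eq_getElem hlt]
    have htake : pm.take (n + 1) = pm.take n ++ [pm[n]] := by
      rw [List.take_succ]
      simp [List.getElem?_eq_getElem hlt]
    rw [whileB]
    by_cases hcond : L > pm[n]
    · rw [dif_pos]
      · have : ((n : Int) + 1 - 1 - 1) = ((n : Int) - 1) := by omega
        rw [this, ih (by omega), htake, rtrim_concat_lt _ hcond]
      · refine ⟨by omega, ?_⟩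
        rw [hget]
        exact hcond
    · rw [dif_neg]
      · rw [htake, rtrim_concat_ge _ (by omega)]
        have h5 : (pm.take n).length = n := List.length_take_of_le (by omega)
        simp [h5]
        omega
      · rw [hget]
        simp only [Option.getD_some]
        omega

theorem loopB_eq_ref (pm : List Int) :
    ∀ (pizza : List Int) (ptr : Int), -1 ≤ ptr → (ptr + 1).toNat ≤ pm.length →
    loopB pm ptr pizza = ref (pm.take (ptr + 1).toNat) pizza := by
  intro pizza
  induction pizza with
  | nil =>
    intro ptr h1 h2
    have : (pm.take (ptr + 1).toNat).length = (ptr + 1).toNat :=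
      List.length_take_of_le h2
    simp only [loopB, ref, this]
    omega
  | cons L rest ih =>
    intro ptr h1 h2
    have hw : whileB pm L ptr = ((rtrim L (pm.take (ptr + 1).toNat)).length : Int) - 1 := by
      have := whileB_go pm L (ptr + 1).toNat h2
      have he : (((ptr + 1).toNat : Int) - 1) = ptr := by omega
      rwa [he] at this
    set t := pm.take (ptr + 1).toNat with ht
    set t' := rtrim L t with ht'
    have hpre : t' <+: pm := (rtrim_prefix L t).trans (List.take_prefix _ _)
    have hteq : t' = pm.take t'.length := List.prefix_iff_eq_take.mp hpre
    have hlen : t'.length ≤ pm.length := hpre.length_le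
    simp only [loopB, ref, hw]
    by_cases hnil : t' = []
    · rw [if_pos (by simp [hnil]), if_pos hnil]
    · have hpos : 0 < t'.length := List.length_pos_iff.mpr hnil
      rw [if_neg (by omega), if_neg hnil]
      have ihh := ih (((t'.length : Int) - 1) - 1) (by omega) (by omega)
      rw [ihh]
      congr 1
      have h3 : ((t'.length : Int) - 1 - 1 + 1).toNat = t'.length - 1 := by omega
      rw [h3]
      have : pm.take (t'.length - 1) = (pm.take t'.length).take (t'.length - 1) := by
        rw [List.take_take]
        congr 1
        omega
      rw [this, ← hteq, ← List.dropLast_eq_take]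

theorem loopA_eq_ref :
    ∀ (pizza ml : List Int) (cnt : PySem.Dict Int Int),
    (∀ s ∈ ml, 1 ≤ cnt.getD s 0) → List.Pairwise (· > ·) ml →
    loopA ml cnt pizza = ref (expand cnt ml) pizza := by
  intro pizza
  induction pizza with
  | nil =>
    intro ml cnt hc _
    simp only [loopA, ref]
    rw [sum_counts cnt ml 1 hc]
    omega
  | cons L rest ih =>
    intro ml cnt hc hp
    obtain ⟨hexp, hpre⟩ := whilePopA_expand L ml cnt hc
    set ml1 := whilePopA L ml with hml1
    have hc1 : ∀ s ∈ ml1, 1 ≤ cnt.getD s 0 := fun s hs => hc s (hpre.subset hs)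
    have hp1 : List.Pairwise (· > ·) ml1 := hp.sublist hpre.sublist
    simp only [loopA, ref]
    cases hml : ml1.getLast? with
    | none =>
      have : ml1 = [] := List.getLast?_eq_none_iff.mp hml
      rw [if_pos]
      rw [← hexp, this]
      rfl
    | some s =>
      obtain ⟨u, hu⟩ := List.getLast?_eq_some_iff.mp hml
      have hcs : 1 ≤ cnt.getD s 0 := hc1 s (by simp [hu])
      have hsu : s ∉ u := by
        intro hmem
        rw [hu] at hp1
        exact lt_irrefl s ((List.pairwise_append.mp hp1).2.2 s hmem s (by simp))
      have hnil : rtrim L (expand cnt ml) ≠ [] := by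
        rw [← hexp, hu, expand_concat]
        have h1 : (cnt.getD s 0).toNat = ((cnt.getD s 0).toNat - 1) + 1 := by omega
        rw [h1, List.replicate_succ', ← List.append_assoc]
        simp
      rw [if_neg hnil]
      show (if ((cnt.insert s (cnt.getD s 0 - 1)).getD s 0 == 0) = true then
          loopA ml1.dropLast (cnt.insert s (cnt.getD s 0 - 1)) rest
        else loopA ml1 (cnt.insert s (cnt.getD s 0 - 1)) rest)
        = ref (rtrim L (expand cnt ml)).dropLast rest
      have hdrop : (rtrim L (expand cnt ml)).dropLast
          = expand cnt u ++ List.replicate ((cnt.getD s 0).toNat - 1) s := by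
        rw [← hexp, hu, expand_concat]
        have h1 : (cnt.getD s 0).toNat = ((cnt.getD s 0).toNat - 1) + 1 := by omega
        rw [h1, List.replicate_succ', ← List.append_assoc, List.dropLast_concat]
        simp
      have hins : (cnt.insert s (cnt.getD s 0 - 1)).getD s 0 = cnt.getD s 0 - 1 := by
        rw [PySem.Dict.getD_insert]
        simp
      by_cases hz : cnt.getD s 0 - 1 = 0
      · rw [if_pos (by rw [hins]; simp [hz])]
        rw [hu, List.dropLast_concat]
        have hpu : List.Pairwise (· > ·) u := (List.pairwise_append.mp (hu ▸ hp1)).1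
        have hcu : ∀ x ∈ u, 1 ≤ (cnt.insert s (cnt.getD s 0 - 1)).getD x 0 := by
          intro x hx
          rw [PySem.Dict.getD_insert, if_neg (by rintro rfl; exact hsu hx)]
          exact hc1 x (by simp [hu, hx])
        rw [ih u _ hcu hpu, expand_insert_of_not_mem _ _ hsu, hdrop]
        have : (cnt.getD s 0).toNat - 1 = 0 := by omega
        rw [this]
        simp
      · rw [if_neg (by rw [hins]; simpa using hz)]
        have hcm : ∀ x ∈ ml1, 1 ≤ (cnt.insert s (cnt.getD s 0 - 1)).getD x 0 := by
          intro x hx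
          rw [PySem.Dict.getD_insert]
          by_cases hxs : x = s
          · rw [if_pos hxs]; omega
          · rw [if_neg hxs]; exact hc1 x hx
        rw [ih ml1 _ hcm hp1]
        congr 1
        rw [hu, expand_concat, expand_insert_of_not_mem _ _ hsu, hins, hdrop]
        congr 1
        congr 1
        omega

-- the builders: minCheck's (stack, counts) expands to B's prefix-minimum array
theorem mcGo (arr : List Int) :
    ∀ (ls : List Int) (cnt : PySem.Dict Int Int) (mv : Int),
    ls.getLast? = some mv → List.Pairwise (· > ·) ls → (∀ s ∈ ls, 1 ≤ cnt.getD s 0) →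
    List.Pairwise (· > ·) (minCheckGo arr ls cnt mv).1 ∧
    (∀ s ∈ (minCheckGo arr ls cnt mv).1, 1 ≤ (minCheckGo arr ls cnt mv).2.getD s 0) ∧
    expand (minCheckGo arr ls cnt mv).2 (minCheckGo arr ls cnt mv).1
      = prefixMinGo (expand cnt ls) arr := by
  induction arr with
  | nil => intro ls cnt mv _ hp hc; exact ⟨hp, hc, rfl⟩
  | cons num rest ih =>
    intro ls cnt mv hl hp hc
    have hmin : ∀ a ∈ ls, mv ≤ a := getLast_min hl hp
    have hcm : 1 ≤ cnt.getD mv 0 := hc mv (List.mem_of_getLast? hl)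
    have hpm : (expand cnt ls).getLast? = some mv := expand_getLast hl hcm
    obtain ⟨u, hu⟩ := List.getLast?_eq_some_iff.mp hl
    have hmu : mv ∉ u := by
      intro hmem
      rw [hu] at hp
      exact lt_irrefl mv ((List.pairwise_append.mp hp).2.2 mv hmem mv (by simp))
    simp only [minCheckGo, prefixMinGo, hpm]
    by_cases hlt : num < mv
    · rw [if_pos hlt]
      have hnotin : num ∉ ls := fun hmem => absurd (hmin num hmem) (by omega)
      have h1 : (ls ++ [num]).getLast? = some num := List.getLast?_concat
      have h2 : List.Pairwise (· > ·) (ls ++ [num]) := by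
        rw [List.pairwise_append]
        exact ⟨hp, by simp, fun a ha b hb => by simp at hb; subst hb; have := hmin a ha; omega⟩
      have h3 : ∀ s ∈ ls ++ [num], 1 ≤ (cnt.insert num 1).getD s 0 := by
        intro s hs
        rw [PySem.Dict.getD_insert]
        rcases List.mem_append.mp hs with h | h
        · rw [if_neg (by rintro rfl; exact hnotin h)]; exact hc s h
        · simp at h; subst h; simp
      have h4 : expand (cnt.insert num 1) (ls ++ [num]) = expand cnt ls ++ [num] := by
        rw [expand_concat, expand_insert_of_not_mem _ _ hnotin, PySem.Dict.getD_insert]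
        simp
      have := ih (ls ++ [num]) (cnt.insert num 1) num h1 h2 h3
      rw [h4] at this
      rw [if_pos hlt]
      exact this
    · rw [if_neg hlt]
      have h3 : ∀ s ∈ ls, 1 ≤ (cnt.insert mv (cnt.getD mv 0 + 1)).getD s 0 := by
        intro s hs
        rw [PySem.Dict.getD_insert]
        by_cases hsm : s = mv
        · rw [if_pos hsm]; omega
        · rw [if_neg hsm]; exact hc s hs
      have h4 : expand (cnt.insert mv (cnt.getD mv 0 + 1)) ls = expand cnt ls ++ [mv] := by
        rw [hu, expand_concat, expand_concat, expand_insert_of_not_mem _ _ hmu,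
          PySem.Dict.getD_insert, if_pos rfl]
        have : (cnt.getD mv 0 + 1).toNat = (cnt.getD mv 0).toNat + 1 := by omega
        rw [this, List.replicate_succ', List.append_assoc]
      have := ih ls (cnt.insert mv (cnt.getD mv 0 + 1)) mv hl hp h3
      rw [h4] at this
      rw [if_neg hlt]
      exact this

theorem solution_spec_aux (oven pizza : List Int) (hpre : oven.headI < 1000000001) :
    solution 0 0 oven pizza = solution_alt 0 0 oven pizza := by
  cases oven with
  | nil =>
    show loopA [] PySem.Dict.empty pizza = loopB [] ((([] : List Int).length : Int) - 1) pizza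
    have hb := loopB_eq_ref ([] : List Int) pizza (-1) (by omega) (by simp)
    have ha := loopA_eq_ref pizza [] (PySem.Dict.empty : PySem.Dict Int Int) (by simp) (by simp)
    have h0 : ((([] : List Int).length : Int) - 1) = -1 := by simp
    rw [h0, ha, hb]
    rfl
  | cons x rest =>
    simp only [List.headI] at hpre
    unfold solution solution_alt minCheck
    simp only [minCheckGo, prefixMinGo, if_pos hpre, List.getLast?_nil, List.nil_append]
    have h1 : ([x] : List Int).getLast? = some x := rfl
    have h2 : List.Pairwise (· > ·) [x] := by simp
    have h3 : ∀ s ∈ [x], 1 ≤ ((PySem.Dict.empty : PySem.Dict Int Int).insert x 1).getD s 0 := by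
      intro s hs
      simp at hs
      subst hs
      rw [PySem.Dict.getD_insert]
      simp
    obtain ⟨hpw, hcnt, hexp⟩ := mcGo rest [x] ((PySem.Dict.empty : PySem.Dict Int Int).insert x 1) x h1 h2 h3
    have hx : expand ((PySem.Dict.empty : PySem.Dict Int Int).insert x 1) [x] = [x] := by
      show List.replicate (((PySem.Dict.empty : PySem.Dict Int Int).insert x 1).getD x 0).toNat x ++ [] = [x]
      rw [PySem.Dict.getD_insert]
      simp
    rw [hx] at hexp
    set pm := prefixMinGo [x] rest with hpm
    rw [loopA_eq_ref pizza _ _ hcnt hpw, hexp]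
    have hb := loopB_eq_ref pm pizza ((pm.length : Int) - 1) (by omega) (by omega)
    have he : (((pm.length : Int) - 1) + 1).toNat = pm.length := by omega
    rw [he, List.take_length] at hb
    exact hb.symm

theorem solution_spec : Claim_equal_solution := by
  unfold Claim_equal_solution
  intro D N oven pizza _ hpre
  unfold Spec_solution
  have := solution_spec_aux oven pizza hpre
  simpa [solution, solution_alt] using this

-- ===== VERDICT (by name: the statement is the Claim_ definition above) =====
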